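-- pv_equiv track=rewrite | github.com/tejava7177/Use_Magenta | ai_song_maker/reverse_score.py | velocity_to_dynamic
-- ===== SOURCE A (Python) =====
-- def velocity_to_dynamic(velocity):
--     if not velocity:
--         return 'mf'
--     # Original mapping from dynamic markings to MIDI velocities
--     dynamic_mapping = {
--         'pp': 31,
--         'p': 42,
--         'mp': 53,
--         'mf': 64,
--         'f': 80,
--         'ff': 96,
--     }
--
--     # Invert the dictionary to create a reverse mapping
--     reverse_mapping = {v: k for k, v in dynamic_mapping.items()}
--
--     # Find the closest velocity in the reverse mapping
--     closest_velocity = min(reverse_mapping.keys(), key=lambda x: abs(x - velocity))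
--
--     return reverse_mapping[closest_velocity]
-- ===== SOURCE B (Python) =====
-- def velocity_to_dynamic(velocity):
--     if not velocity:
--         return 'mf'
--     # midpoint boundaries between the anchor velocities 31,42,53,64,80,96
--     if velocity <= 36:
--         return 'pp'
--     if velocity <= 47:
--         return 'p'
--     if velocity <= 58:
--         return 'mp'
--     if velocity <= 72:
--         return 'mf'
--     if velocity <= 88:
--         return 'f'
--     return 'ff'
-- ===== Notes on version B (the rewrite author's own statement) =====
-- stated objective: simpler
-- what changed: Replaced the dict-inversion plus min-by-absolute-distance scan with a direct chain of comparisons against the fixed midpoint boundaries between consecutive anchor velocities (36, 47, 58, 72, 88).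
import Mathlib
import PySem

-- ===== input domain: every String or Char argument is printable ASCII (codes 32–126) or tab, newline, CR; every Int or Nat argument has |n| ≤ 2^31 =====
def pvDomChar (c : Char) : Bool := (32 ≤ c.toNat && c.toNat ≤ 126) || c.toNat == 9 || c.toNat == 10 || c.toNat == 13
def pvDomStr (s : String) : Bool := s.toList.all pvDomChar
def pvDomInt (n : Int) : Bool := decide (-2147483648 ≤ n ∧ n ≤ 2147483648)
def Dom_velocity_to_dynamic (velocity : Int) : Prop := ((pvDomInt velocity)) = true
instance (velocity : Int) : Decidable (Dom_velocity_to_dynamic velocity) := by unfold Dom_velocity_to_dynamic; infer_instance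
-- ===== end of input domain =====

-- B replaces A's dict inversion + min-by-|distance| scan with a direct fixed midpoint-boundary comparison chain (simpler).

-- ===== PORT A =====
def velocity_to_dynamic (velocity : Int) : String :=
  if velocity == 0 then "mf"
  else
    let dynamic_mapping : PySem.Dict String Int :=
      PySem.Dict.ofList [("pp", 31), ("p", 42), ("mp", 53), ("mf", 64), ("f", 80), ("ff", 96)]
    let reverse_mapping : PySem.Dict Int String :=
      dynamic_mapping.items.foldl (fun d kv => d.insert kv.2 kv.1) PySem.Dict.empty
    match PySem.List.min? reverse_mapping.keys (fun x => |x - velocity|) with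
    | some closest_velocity => (reverse_mapping.get? closest_velocity).getD ""
      -- reverse_mapping[closest_velocity]: closest_velocity comes from reverse_mapping.keys, so get? is always some
    | none => ""  -- unreachable: the keys list is nonempty, so Python's min never raises here

-- ===== PORT B =====
def velocity_to_dynamic_alt (velocity : Int) : String :=
  if velocity == 0 then "mf"
  else if velocity ≤ 36 then "pp"
  else if velocity ≤ 47 then "p"
  else if velocity ≤ 58 then "mp"
  else if velocity ≤ 72 then "mf"
  else if velocity ≤ 88 then "f"
  else "ff"

-- ===== PRECONDITION & SPEC =====
def Spec_velocity_to_dynamic (velocity : Int) (out : String) : Prop := out = velocity_to_dynamic_alt velocity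
instance (velocity : Int) (out : String) : Decidable (Spec_velocity_to_dynamic velocity out) := by unfold Spec_velocity_to_dynamic; infer_instance

-- ===== CLAIM (what is proved, stated in full; the proofs are below) =====
def Claim_equal_velocity_to_dynamic : Prop := ∀ (velocity : Int), Dom_velocity_to_dynamic velocity → Spec_velocity_to_dynamic velocity (velocity_to_dynamic velocity)

-- ===== LEMMAS AND PROOFS =====

-- ===== VERDICT (by name: the statement is the Claim_ definition above) =====
theorem velocity_to_dynamic_spec : Claim_equal_velocity_to_dynamic := by
  intro v _
  unfold Spec_velocity_to_dynamic velocity_to_dynamic velocity_to_dynamic_alt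
  by_cases h0 : v = 0
  · simp [h0]
  · simp only [beq_iff_eq, h0, if_false]
    rw [show ((PySem.Dict.ofList [("pp", (31:Int)), ("p", 42), ("mp", 53), ("mf", 64), ("f", 80), ("ff", 96)]).items.foldl
          (fun d kv => d.insert kv.2 kv.1) PySem.Dict.empty)
        = PySem.Dict.mk [((31:Int), "pp"), (42, "p"), (53, "mp"), (64, "mf"), (80, "f"), (96, "ff")] from by decide]
    simp only [PySem.Dict.keys, List.map, PySem.List.min?, List.foldl, Int.abs_eq_natAbs,
      PySem.Dict.get?, List.find?, Option.map, Option.getD]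
    repeat' (split_ifs <;> try simp only [])
    all_goals first | rfl | (exfalso; omega)
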